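-- pv_equiv track=rewrite | github.com/RxndyOG/BachelorsThesisStateAbstractionStefanWerner | Agents/ValueAgentBasic.py | parse_operations
-- ===== SOURCE A (Python) =====
-- def parse_operations(operations):
--     """
--     Unterstützt:
--     "rddr"   -> [("r",1), ("d",1), ("d",1), ("r",1)]
--     "r2d3"   -> [("r",2), ("d",3)]
--     """
--     result = []
--     i = 0
--
--     while i < len(operations):
--         op = operations[i]
--         i += 1
--
--         num_str = ""
--         while i < len(operations) and operations[i].isdigit():
--             num_str += operations[i]
--             i += 1
--
--         count = int(num_str) if num_str else 1
--         result.append((op, count))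
--
--     return result
-- ===== SOURCE B (Python) =====
-- import re
--
-- def parse_operations(operations):
--     """Single regex pass: each op char with its trailing digit run; default count 1."""
--     return [(op, int(d) if d else 1)
--             for op, d in re.findall(r'(.)(\d*)', operations, re.DOTALL)]
-- ===== Notes on version B (the rewrite author's own statement) =====
-- stated objective: idiomatic
-- what changed: Replaced the manual index-based while loops and character-by-character digit accumulation with a single regex pass (re.findall of an op char plus its digit run) and a comprehension.
import Mathlib
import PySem

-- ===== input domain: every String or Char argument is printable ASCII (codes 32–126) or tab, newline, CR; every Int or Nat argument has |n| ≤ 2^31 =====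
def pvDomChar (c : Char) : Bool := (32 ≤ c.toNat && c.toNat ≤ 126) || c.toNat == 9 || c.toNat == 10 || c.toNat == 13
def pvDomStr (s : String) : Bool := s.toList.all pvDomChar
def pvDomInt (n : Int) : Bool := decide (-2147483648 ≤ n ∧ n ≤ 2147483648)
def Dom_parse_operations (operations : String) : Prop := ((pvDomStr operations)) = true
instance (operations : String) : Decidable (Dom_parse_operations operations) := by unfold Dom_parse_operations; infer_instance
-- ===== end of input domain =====

-- B replaces A's manual index-based while loops and digit accumulation by a single
-- regex-style tokenization pass (one op char + its digit run per token); objective: idiomatic.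

-- shared helper: Python's int() applied to the (nonempty, all-digit) captured string;
-- both A and B call int() on exactly such strings, where ofChars? never returns none.
def pvIntOf (cs : List Char) : Int := (PySem.Int.ofChars? cs).getD 0

-- ===== PORT A =====
-- inner `while`: accumulate the digit run starting at index i (str.isdigit, exact on Dom's ASCII).
-- fuel merely bounds the loop (each step does i += 1, so s.length steps always suffice).
def parseA_inner (s : List Char) : Nat → Nat → List Char → Nat × List Char
  | 0, i, num => (i, num)
  | fuel + 1, i, num =>
    if h : i < s.length then
      if PySem.Chars.isdigit s[i] then parseA_inner s fuel (i + 1) (num ++ [s[i]])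
      else (i, num)
    else (i, num)

-- outer `while`: one op char, then its digit run, append (op, count); fuel as above.
def parseA_outer (s : List Char) : Nat → Nat → List (String × Int) → List (String × Int)
  | 0, _, result => result
  | fuel + 1, i, result =>
    if h : i < s.length then
      let op := s[i]
      let p := parseA_inner s s.length (i + 1) []
      let count : Int := if p.2 = [] then 1 else pvIntOf p.2
      parseA_outer s fuel p.1 (result ++ [(String.ofList [op], count)])
    else result

def parse_operations (operations : String) : List (String × Int) :=
  parseA_outer operations.toList operations.toList.length 0 []

-- ===== PORT B =====
-- one regex match `(.)(\d*)` = head char + maximal digit run (\d = ASCII digits on Dom).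
-- fuel merely bounds the recursion (each token consumes ≥ 1 char, so cs.length suffices).
def parseB_go : Nat → List Char → List (String × Int)
  | _, [] => []
  | 0, _ :: _ => []
  | fuel + 1, c :: rest =>
      let ds := rest.takeWhile PySem.Chars.isdigit
      (String.ofList [c], if ds = [] then 1 else pvIntOf ds) ::
        parseB_go fuel (rest.dropWhile PySem.Chars.isdigit)

def parse_operations_alt (operations : String) : List (String × Int) :=
  parseB_go operations.toList.length operations.toList

-- ===== PRECONDITION & SPEC =====
def Spec_parse_operations (operations : String) (out : List (String × Int)) : Prop := out = parse_operations_alt operations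
instance (operations : String) (out : List (String × Int)) : Decidable (Spec_parse_operations operations out) := by unfold Spec_parse_operations; infer_instance

-- ===== CLAIM (what is proved, stated in full; the proofs are below) =====
def Claim_equal_parse_operations : Prop := ∀ (operations : String), Dom_parse_operations operations → Spec_parse_operations operations (parse_operations operations)

-- ===== LEMMAS AND PROOFS =====

theorem dropWhile_eq_drop_takeWhile {α : Type} (p : α → Bool) (l : List α) :
    l.dropWhile p = l.drop (l.takeWhile p).length := by
  induction l with
  | nil => rfl
  | cons a l ih =>
    by_cases h : p a
    · simp [List.dropWhile, List.takeWhile, h, ih]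
    · simp [List.dropWhile, List.takeWhile, h]

theorem parseA_inner_spec (s : List Char) :
    ∀ (fuel i : Nat) (num : List Char), s.length - i ≤ fuel →
      parseA_inner s fuel i num =
        (i + ((s.drop i).takeWhile PySem.Chars.isdigit).length,
         num ++ (s.drop i).takeWhile PySem.Chars.isdigit) := by
  intro fuel
  induction fuel with
  | zero =>
    intro i num hk
    rw [parseA_inner, List.drop_eq_nil_of_le (by omega)]
    simp
  | succ fuel ih =>
    intro i num hk
    by_cases h : i < s.length
    · rw [parseA_inner, dif_pos h, List.drop_eq_getElem_cons h]
      by_cases hd : PySem.Chars.isdigit s[i]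
      · rw [if_pos hd, ih (i + 1) (num ++ [s[i]]) (by omega)]
        simp [List.takeWhile, hd]
        omega
      · rw [if_neg hd]
        simp [List.takeWhile, hd]
    · rw [parseA_inner, dif_neg h, List.drop_eq_nil_of_le (by omega)]
      simp

theorem parseB_go_congr :
    ∀ (f1 : Nat) (cs : List Char) (f2 : Nat), cs.length ≤ f1 → cs.length ≤ f2 →
      parseB_go f1 cs = parseB_go f2 cs := by
  intro f1
  induction f1 with
  | zero =>
    intro cs f2 h1 _
    have hcs : cs = [] := by
      cases cs with
      | nil => rfl
      | cons c r => simp at h1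
    subst hcs
    cases f2 <;> rfl
  | succ f ih =>
    intro cs f2 h1 h2
    cases cs with
    | nil => cases f2 <;> rfl
    | cons c rest =>
      cases f2 with
      | zero => simp at h2
      | succ g =>
        rw [parseB_go, parseB_go]
        have hle := List.length_dropWhile_le (p := PySem.Chars.isdigit) (l := rest)
        simp only [List.length_cons] at h1 h2
        rw [ih _ g (by omega) (by omega)]

theorem parseA_outer_spec (s : List Char) :
    ∀ (fuel i : Nat) (acc : List (String × Int)), s.length - i ≤ fuel →
      parseA_outer s fuel i acc =
        acc ++ parseB_go (s.drop i).length (s.drop i) := by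
  intro fuel
  induction fuel with
  | zero =>
    intro i acc hk
    rw [parseA_outer, List.drop_eq_nil_of_le (by omega)]
    simp [parseB_go]
  | succ fuel ih =>
    intro i acc hk
    by_cases h : i < s.length
    · rw [parseA_outer, dif_pos h]
      simp only [parseA_inner_spec s s.length (i + 1) [] (by omega), List.nil_append]
      rw [ih _ _ (by omega)]
      rw [show s.drop i = s[i] :: s.drop (i + 1) from List.drop_eq_getElem_cons h]
      rw [List.length_cons, parseB_go,
          dropWhile_eq_drop_takeWhile, List.drop_drop]
      rw [parseB_go_congr _ _ (s.length - (i + 1))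
            (by simp) (by simp; omega)]
      simp
    · rw [parseA_outer, dif_neg h, List.drop_eq_nil_of_le (by omega)]
      simp [parseB_go]

-- ===== VERDICT (by name: the statement is the Claim_ definition above) =====
theorem parse_operations_spec : Claim_equal_parse_operations := by
  intro operations _
  unfold Spec_parse_operations parse_operations parse_operations_alt
  simpa using parseA_outer_spec operations.toList operations.toList.length 0 [] (by omega)
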